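-- pv_equiv track=rewrite | github.com/sujKandwal/EfficiencySearcher | EfficiencySearch.py | get_misspelled_2
-- ===== SOURCE A (Python) =====
-- def get_misspelled_2(dictionary, text):
--   misspelledList = []
--   dictionary2 = set(dictionary)
--   text2 = set()
--   for word in text:
--     word2 = word.lower()
--     text2.add(word2)
--   set3 = text2 - dictionary2
--   for word in text:
--     word2 = word.lower()
--     if word2 in set3:
--       misspelledList.append(word)
--   return misspelledList
-- ===== SOURCE B (Python) =====
-- def get_misspelled_2(dictionary, text):
--   known = set(dictionary)
--   return [word for word in text if word.lower() not in known]
-- ===== Notes on version B (the rewrite author's own statement) =====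
-- stated objective: simpler
-- what changed: Replaced the two-pass build-a-lowercased-text-set-then-subtract decomposition with a single direct filtering pass: build set(dictionary) once and keep each word whose lowercase is not in it.
import Mathlib
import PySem

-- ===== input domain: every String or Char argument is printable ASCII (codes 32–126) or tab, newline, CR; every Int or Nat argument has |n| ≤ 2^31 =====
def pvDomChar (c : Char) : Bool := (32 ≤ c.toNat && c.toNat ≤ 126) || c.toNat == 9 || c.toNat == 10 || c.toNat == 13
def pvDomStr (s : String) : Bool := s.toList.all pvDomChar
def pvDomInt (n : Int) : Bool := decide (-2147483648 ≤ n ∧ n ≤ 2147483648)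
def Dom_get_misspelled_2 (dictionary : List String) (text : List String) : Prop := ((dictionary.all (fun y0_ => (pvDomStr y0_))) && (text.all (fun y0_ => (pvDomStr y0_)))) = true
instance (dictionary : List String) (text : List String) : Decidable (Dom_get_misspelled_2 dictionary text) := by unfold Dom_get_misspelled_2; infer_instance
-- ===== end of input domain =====

-- ===== PORT A =====
-- B replaces A's build-lowercased-set-then-subtract with one direct filtering pass (simpler).
def get_misspelled_2 (dictionary : List String) (text : List String) : List String :=
  let dictionary2 : PySem.Set String := PySem.Set.ofList dictionary
  let text2 : PySem.Set String :=
    text.foldl (fun s word => PySem.Set.add s (PySem.Str.lower word)) PySem.Set.empty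
  let set3 : PySem.Set String := PySem.Set.diff text2 dictionary2
  text.foldl (fun acc word =>
    if PySem.Set.contains set3 (PySem.Str.lower word) then acc ++ [word] else acc) []

-- ===== PORT B =====
def get_misspelled_2_alt (dictionary : List String) (text : List String) : List String :=
  let known : PySem.Set String := PySem.Set.ofList dictionary
  text.filter (fun word => !(PySem.Set.contains known (PySem.Str.lower word)))

-- ===== PRECONDITION & SPEC =====
def Spec_get_misspelled_2 (dictionary : List String) (text : List String) (out : List String) : Prop := out = get_misspelled_2_alt dictionary text
instance (dictionary : List String) (text : List String) (out : List String) : Decidable (Spec_get_misspelled_2 dictionary text out) := by unfold Spec_get_misspelled_2; infer_instance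

-- ===== CLAIM (what is proved, stated in full; the proofs are below) =====
def Claim_equal_get_misspelled_2 : Prop := ∀ (dictionary : List String) (text : List String), Dom_get_misspelled_2 dictionary text → Spec_get_misspelled_2 dictionary text (get_misspelled_2 dictionary text)

-- ===== LEMMAS AND PROOFS =====

-- ===== VERDICT (by name: the statement is the Claim_ definition above) =====
theorem text2_eq (text : List String) :
    text.foldl (fun s word => PySem.Set.add s (PySem.Str.lower word)) PySem.Set.empty
      = PySem.Set.ofList (text.map PySem.Str.lower) := by
  rw [← PySem.Set.update_map_eq_foldl_add, PySem.Set.update_empty]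

theorem get_misspelled_2_spec : Claim_equal_get_misspelled_2 := by
  intro dictionary text _
  unfold Spec_get_misspelled_2 get_misspelled_2 get_misspelled_2_alt
  simp only [text2_eq]
  rw [PySem.List.foldl_congr_mem
      (g := fun acc word =>
        if !(PySem.Set.contains (PySem.Set.ofList dictionary) (PySem.Str.lower word)) then
          acc ++ [word] else acc)]
  · rw [PySem.List.foldl_append_if_eq_filter]
    simp
  · intro acc word hmem
    have hcond : PySem.Set.contains
        (PySem.Set.diff (PySem.Set.ofList (text.map PySem.Str.lower)) (PySem.Set.ofList dictionary))
        (PySem.Str.lower word)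
        = !(PySem.Set.contains (PySem.Set.ofList dictionary) (PySem.Str.lower word)) := by
      by_cases h : PySem.Str.lower word ∈ PySem.Set.ofList dictionary
      · have hd : PySem.Str.lower word ∉
            PySem.Set.diff (PySem.Set.ofList (text.map PySem.Str.lower)) (PySem.Set.ofList dictionary) :=
          fun hc => (PySem.Set.mem_diff _ _ _).mp hc |>.2 h
        have hc1 : PySem.Set.contains (PySem.Set.ofList dictionary) (PySem.Str.lower word) = true :=
          (PySem.Set.contains_iff _ _).mpr h
        have hc2 : PySem.Set.contains
            (PySem.Set.diff (PySem.Set.ofList (text.map PySem.Str.lower)) (PySem.Set.ofList dictionary))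
            (PySem.Str.lower word) = false := by
          cases hc : PySem.Set.contains
              (PySem.Set.diff (PySem.Set.ofList (text.map PySem.Str.lower)) (PySem.Set.ofList dictionary))
              (PySem.Str.lower word)
          · rfl
          · exact absurd ((PySem.Set.contains_iff _ _).mp hc) hd
        simp only [hc1, hc2]; rfl
      · have h1 : PySem.Str.lower word ∈
            PySem.Set.diff (PySem.Set.ofList (text.map PySem.Str.lower)) (PySem.Set.ofList dictionary) :=
          (PySem.Set.mem_diff _ _ _).mpr ⟨(PySem.Set.mem_ofList _ _).mpr (List.mem_map_of_mem hmem), h⟩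
        have h2 : PySem.Set.contains (PySem.Set.ofList dictionary) (PySem.Str.lower word) = false := by
          cases hc : PySem.Set.contains (PySem.Set.ofList dictionary) (PySem.Str.lower word)
          · rfl
          · exact absurd ((PySem.Set.contains_iff _ _).mp hc) h
        simp only [(PySem.Set.contains_iff _ _).mpr h1, h2]; rfl
    rw [hcond]
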